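-- pv_equiv track=rewrite | github.com/JoaoRicardoAL/Algoritmos-Avan-ados | Exercicios/08/E08.py | solve
-- ===== SOURCE A (Python) =====
-- def solve(n, dots):
--     dp = [[0] * n for _ in range(n)]
--
--
--     pre_sum = [0] * (n+1)
--     for i in range(n):
--         pre_sum[i+1] = pre_sum[i] + dots[i]
--
--     def get_sum (i, j):
--         if i > j:
--             return 0
--         return pre_sum[j+1] - pre_sum[i]
--
--     for k in range(1, n+1):
--         for i in range(n - k + 1):
--             j =  i + k - 1
--             if k == 1:
--                 dp[i][j] = dots[i]
--             else:
--                 dp[i][j] = max(dots[i] + (get_sum(i + 1, j) - dp[i + 1][j]),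
--                                dots[j] + (get_sum(i, j - 1) - dp[i][j - 1]))
--     return dp[0][n-1]
-- ===== SOURCE B (Python) =====
-- def solve(n, dots):
--     # Top-down memoized recursion over intervals [i..j] instead of A's
--     # bottom-up double loop over interval lengths.
--     pre = [0] * (n + 1)
--     for i in range(n):
--         pre[i + 1] = pre[i] + dots[i]
--
--     memo = {}
--
--     def best(i, j):
--         if i == j:
--             return dots[i]
--         v = memo.get((i, j))
--         if v is None:
--             v = max(dots[i] + (pre[j + 1] - pre[i + 1] - best(i + 1, j)),
--                     dots[j] + (pre[j] - pre[i] - best(i, j - 1)))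
--             memo[(i, j)] = v
--         return v
--
--     return best(0, n - 1)
-- ===== Notes on version B (the rewrite author's own statement) =====
-- stated objective: alternative
-- what changed: Replaces A's bottom-up interval-length double loop filling an n x n table by a top-down memoized recursion best(i,j) over subintervals cached in a dict (iterative -> recursive decomposition; same O(n^2) work, demand-driven instead of staged by length).
import Mathlib
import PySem

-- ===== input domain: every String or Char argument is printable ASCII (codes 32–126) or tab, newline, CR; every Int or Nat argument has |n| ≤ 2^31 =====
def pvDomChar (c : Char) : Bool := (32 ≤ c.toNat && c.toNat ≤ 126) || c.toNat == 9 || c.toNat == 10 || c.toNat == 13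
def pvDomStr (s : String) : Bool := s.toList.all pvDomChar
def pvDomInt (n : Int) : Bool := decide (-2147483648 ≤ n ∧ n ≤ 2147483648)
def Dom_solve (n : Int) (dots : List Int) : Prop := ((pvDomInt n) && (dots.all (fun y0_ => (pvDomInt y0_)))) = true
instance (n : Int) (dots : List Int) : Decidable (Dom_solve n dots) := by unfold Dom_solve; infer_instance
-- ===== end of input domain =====

-- B replaces A's bottom-up interval-length double loop over an n×n table by a top-down
-- memoized recursion best(i,j) over subintervals, cached in a dict: a different decomposition.

-- shared helper: the prefix-sum array both Pythons build with the same loop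
def buildPre (dots : List Int) (N : Nat) : List Int :=
  (List.range N).foldl (fun ps i => ps.set (i+1) (ps.getD i 0 + dots.getD i 0))
    (List.replicate (N+1) (0:Int))

-- ===== PORT A =====
def getSumA (ps : List Int) (i j : Nat) : Int :=
  if j < i then 0 else ps.getD (j+1) 0 - ps.getD i 0

-- one pass of the inner `for i in range(n - k + 1)` loop of A
def innerA (dots ps : List Int) (N k : Nat) (dp : List (List Int)) : List (List Int) :=
  (List.range (N - k + 1)).foldl (fun dp i =>
    if k = 1 then
      dp.set i ((dp.getD i []).set (i + k - 1) (dots.getD i 0))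
    else
      dp.set i ((dp.getD i []).set (i + k - 1)
        (max (dots.getD i 0
                + (getSumA ps (i+1) (i + k - 1) - (dp.getD (i+1) []).getD (i + k - 1) 0))
             (dots.getD (i + k - 1) 0
                + (getSumA ps i (i + k - 1 - 1) - (dp.getD i []).getD (i + k - 1 - 1) 0))))) dp

def solve (n : Int) (dots : List Int) : Int :=
  let N := n.toNat
  let ps := buildPre dots N
  let dp := (List.range N).foldl (fun dp k' => innerA dots ps N (k'+1) dp)
              (List.replicate N (List.replicate N (0:Int)))
  (dp.getD 0 []).getD (N-1) 0

-- ===== PORT B =====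
-- the memoized recursion `best(i, j)` of Source B, threading the memo dict; the fuel
-- parameter only makes the same computation total (Source B's recursion depth is ≤ j-i,
-- so fuel = n is never exhausted on the admitted inputs)
def bestB (dots ps : List Int) (fuel i j : Nat) (memo : PySem.Dict (Nat × Nat) Int) :
    Int × PySem.Dict (Nat × Nat) Int :=
  match fuel with
  | 0 => (0, memo)
  | fuel' + 1 =>
    if i = j then (dots.getD i 0, memo)
    else
      match memo.get? (i, j) with
      | some v => (v, memo)
      | none =>
        let p1 := bestB dots ps fuel' (i+1) j memo
        let p2 := bestB dots ps fuel' i (j-1) p1.2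
        let v := max (dots.getD i 0 + (ps.getD (j+1) 0 - ps.getD (i+1) 0 - p1.1))
                     (dots.getD j 0 + (ps.getD j 0 - ps.getD i 0 - p2.1))
        (v, p2.2.insert (i, j) v)

def solve_alt (n : Int) (dots : List Int) : Int :=
  let N := n.toNat
  let ps := buildPre dots N
  (bestB dots ps N 0 (N-1) PySem.Dict.empty).1

-- ===== PRECONDITION & SPEC =====
-- Pre_ excludes exactly the inputs where Python A raises IndexError: n < 1 (dp[0][n-1] on an
-- empty table) or n > len(dots) (dots[i] out of range while building the prefix sums).
def Pre_solve (n : Int) (dots : List Int) : Prop := 1 ≤ n ∧ n ≤ (dots.length : Int)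
instance (n : Int) (dots : List Int) : Decidable (Pre_solve n dots) := by
  unfold Pre_solve; infer_instance

def pvWitness_solve : Int × List Int := (3, [5, 3, 7])

def Spec_solve (n : Int) (dots : List Int) (out : Int) : Prop := out = solve_alt n dots
instance (n : Int) (dots : List Int) (out : Int) : Decidable (Spec_solve n dots out) := by
  unfold Spec_solve; infer_instance

-- ===== CLAIM (what is proved, stated in full; the proofs are below) =====
def Claim_equal_solve : Prop :=
  ∀ (n : Int) (dots : List Int), Dom_solve n dots → Pre_solve n dots →
    Spec_solve n dots (solve n dots)

-- ===== LEMMAS AND PROOFS =====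

-- the common specification: game value of the interval [i..j]
def pvTot (dots : List Int) (i j : Nat) : Int := (dots.take (j+1)).sum - (dots.take i).sum

def pvBest (dots : List Int) (i j : Nat) : Int :=
  if _h : i < j then
    pvTot dots i j - min (pvBest dots (i+1) j) (pvBest dots i (j-1))
  else dots.getD i 0
termination_by j - i
decreasing_by all_goals omega

theorem pvBest_lt (dots : List Int) (i j : Nat) (h : i < j) :
    pvBest dots i j = pvTot dots i j - min (pvBest dots (i+1) j) (pvBest dots i (j-1)) := by
  rw [pvBest]; simp [h]

theorem pvBest_self (dots : List Int) (i : Nat) :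
    pvBest dots i i = dots.getD i 0 := by
  rw [pvBest]; simp

theorem getD_set_gen {α : Type} (l : List α) (a i : Nat) (v d : α) :
    (l.set a v).getD i d = if a = i ∧ a < l.length then v else l.getD i d := by
  simp only [List.getD_eq_getElem?_getD, List.getElem?_set]
  split_ifs with h1 h2 h3 <;> simp_all <;> omega

theorem getD_replicate0 {α : Type} (n i : Nat) (d : α) :
    (List.replicate n d).getD i d = d := by
  simp [List.getD_eq_getElem?_getD, List.getElem?_replicate]
  split_ifs <;> simp

theorem take_succ_sum (dots : List Int) (i : Nat) (h : i < dots.length) :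
    (dots.take (i+1)).sum = (dots.take i).sum + dots.getD i 0 := by
  have h2 : dots.take (i+1) = dots.take i ++ [dots[i]] := by
    rw [List.take_succ]
    simp [List.getElem?_eq_getElem h]
  rw [h2, List.getD_eq_getElem _ _ h, List.sum_append]
  simp

-- prefix-sum array correctness
theorem buildPre_spec (dots : List Int) (N : Nat) (hN : N ≤ dots.length) :
    ∀ i ≤ N, (buildPre dots N).getD i 0 = (dots.take i).sum := by
  have main : ∀ m ≤ N,
      (((List.range m).foldl (fun ps i => ps.set (i+1) (ps.getD i 0 + dots.getD i 0))
          (List.replicate (N+1) (0:Int))).length = N+1) ∧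
      (∀ i, ((List.range m).foldl (fun ps i => ps.set (i+1) (ps.getD i 0 + dots.getD i 0))
          (List.replicate (N+1) (0:Int))).getD i 0 = if i ≤ m then (dots.take i).sum else 0) := by
    intro m
    induction m with
    | zero =>
      intro _
      simp only [List.range_zero, List.foldl_nil]
      refine ⟨by simp, fun i => ?_⟩
      rw [getD_replicate0]
      split_ifs with h
      · interval_cases i; simp
      · rfl
    | succ m ih =>
      intro hm
      obtain ⟨hlen, hget⟩ := ih (by omega)
      rw [List.range_succ, List.foldl_append]
      refine ⟨by simpa using hlen, fun i => ?_⟩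
      simp only [List.foldl_cons, List.foldl_nil]
      rw [getD_set_gen, hlen]
      rcases eq_or_ne (m+1) i with h | h
      · subst h
        simp only [hm, true_and, if_pos (by omega : m + 1 < N + 1)]
        rw [hget m, if_pos le_rfl, if_pos le_rfl,
          take_succ_sum dots m (by omega)]
      · rw [if_neg (by tauto), hget i]
        split_ifs <;> first | rfl | omega
  intro i hi
  unfold buildPre
  rw [(main N le_rfl).2 i, if_pos hi]

-- dp[i] + rest-of-interval-sum identities used by the recurrence
theorem tot_left (dots : List Int) (i j : Nat) (hij : i < j) (hj : j < dots.length) :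
    dots.getD i 0 + (pvTot dots (i+1) j) = pvTot dots i j := by
  have := take_succ_sum dots i (by omega)
  unfold pvTot
  linarith

theorem tot_right (dots : List Int) (i j : Nat) (hij : i < j) (hj : j < dots.length) :
    dots.getD j 0 + (pvTot dots i (j-1)) = pvTot dots i j := by
  have := take_succ_sum dots j hj
  unfold pvTot
  have hj1 : j - 1 + 1 = j := by omega
  rw [hj1]
  linarith

-- ===== A-side invariant =====

def get2 (dp : List (List Int)) (i j : Nat) : Int := (dp.getD i []).getD j 0

def InvA (dots : List Int) (N k : Nat) (dp : List (List Int)) : Prop :=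
  dp.length = N ∧ (∀ i, (dp.getD i []).length = if i < N then N else 0) ∧
  ∀ i j, i < N → j < N →
    get2 dp i j = if i ≤ j ∧ j + 1 - i ≤ k then pvBest dots i j else 0

theorem getD_replicate_cases {α : Type} (n i : Nat) (v d : α) :
    (List.replicate n v).getD i d = if i < n then v else d := by
  split_ifs with h
  · rw [List.getD_eq_getElem _ _ (by simpa using h)]
    simp
  · rw [List.getD_eq_default]
    simpa using h

theorem invA_init (dots : List Int) (N : Nat) :
    InvA dots N 0 (List.replicate N (List.replicate N (0:Int))) := by
  refine ⟨by simp, fun i => ?_, fun i j hi hj => ?_⟩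
  · rw [getD_replicate_cases]
    split_ifs <;> simp
  · unfold get2
    rw [getD_replicate_cases]
    rw [if_neg (by omega : ¬ (i ≤ j ∧ j + 1 - i ≤ 0))]
    split_ifs with h <;> simp [getD_replicate_cases]

theorem max_sub_min (T a b : Int) : max (T - a) (T - b) = T - min a b := by
  omega

-- the invariant after m steps of the inner loop at interval length k
def InvAm (dots : List Int) (N k m : Nat) (dp : List (List Int)) : Prop :=
  dp.length = N ∧ (∀ i', (dp.getD i' []).length = if i' < N then N else 0) ∧
  ∀ i j, i < N → j < N → get2 dp i j =
    if i ≤ j ∧ (j + 1 - i ≤ k - 1 ∨ (j + 1 - i = k ∧ i < m)) then pvBest dots i j else 0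

-- the value A writes at step m of the inner loop (k ≥ 2) is pvBest m (m+k-1)
theorem stepA_val (dots ps : List Int) (N k m : Nat)
    (hps : ps = buildPre dots N) (hN : N ≤ dots.length)
    (hk2 : 2 ≤ k) (hkN : k ≤ N) (hm : m < N - k + 1) (dp' : List (List Int))
    (hget : ∀ i j, i < N → j < N → get2 dp' i j =
      if i ≤ j ∧ (j + 1 - i ≤ k - 1 ∨ (j + 1 - i = k ∧ i < m)) then pvBest dots i j else 0) :
    max (dots.getD m 0
           + (getSumA ps (m+1) (m + k - 1) - (dp'.getD (m+1) []).getD (m + k - 1) 0))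
        (dots.getD (m + k - 1) 0
           + (getSumA ps m (m + k - 1 - 1) - (dp'.getD m []).getD (m + k - 1 - 1) 0))
      = pvBest dots m (m + k - 1) := by
  have hj0 : m + k - 1 < N := by omega
  have hg1 : (dp'.getD (m+1) []).getD (m + k - 1) 0 = pvBest dots (m+1) (m + k - 1) := by
    rw [show (dp'.getD (m+1) []).getD (m + k - 1) 0 = get2 dp' (m+1) (m + k - 1) from rfl,
      hget (m+1) (m + k - 1) (by omega) hj0, if_pos (by omega)]
  have hg2 : (dp'.getD m []).getD (m + k - 1 - 1) 0 = pvBest dots m (m + k - 1 - 1) := by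
    rw [show (dp'.getD m []).getD (m + k - 1 - 1) 0 = get2 dp' m (m + k - 1 - 1) from rfl,
      hget m (m + k - 1 - 1) (by omega) (by omega), if_pos (by omega)]
  have hs1 : getSumA ps (m+1) (m + k - 1) = pvTot dots (m+1) (m + k - 1) := by
    unfold getSumA
    rw [if_neg (by omega), hps, buildPre_spec dots N hN (m + k - 1 + 1) (by omega),
      buildPre_spec dots N hN (m+1) (by omega)]
    rfl
  have hs2 : getSumA ps m (m + k - 1 - 1) = pvTot dots m (m + k - 1 - 1) := by
    unfold getSumA
    rw [if_neg (by omega), hps, buildPre_spec dots N hN (m + k - 1 - 1 + 1) (by omega),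
      buildPre_spec dots N hN m (by omega)]
    rfl
  have ht1 : dots.getD m 0 + pvTot dots (m+1) (m + k - 1) = pvTot dots m (m + k - 1) :=
    tot_left dots m (m + k - 1) (by omega) (by omega)
  have ht2 : dots.getD (m + k - 1) 0 + pvTot dots m (m + k - 1 - 1)
      = pvTot dots m (m + k - 1) := by
    have e : m + k - 1 - 1 = (m + k - 1) - 1 := rfl
    rw [e]
    exact tot_right dots m (m + k - 1) (by omega) (by omega)
  rw [hg1, hg2, hs1, hs2]
  have e1 : dots.getD m 0 + (pvTot dots (m+1) (m + k - 1) - pvBest dots (m+1) (m + k - 1))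
      = pvTot dots m (m + k - 1) - pvBest dots (m+1) (m + k - 1) := by omega
  have e2 : dots.getD (m + k - 1) 0
        + (pvTot dots m (m + k - 1 - 1) - pvBest dots m (m + k - 1 - 1))
      = pvTot dots m (m + k - 1) - pvBest dots m (m + k - 1 - 1) := by omega
  rw [e1, e2, max_sub_min, pvBest_lt dots m (m + k - 1) (by omega)]

-- effect of one assignment dp[m][m+k-1] := v on the A-invariant
theorem set2_inv (dots : List Int) (N k m : Nat) (hk1 : 1 ≤ k) (hkN : k ≤ N)
    (hm : m < N - k + 1) (dp' : List (List Int))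
    (hlen : dp'.length = N)
    (hrow : ∀ i', (dp'.getD i' []).length = if i' < N then N else 0)
    (hget : ∀ i j, i < N → j < N → get2 dp' i j =
      if i ≤ j ∧ (j + 1 - i ≤ k - 1 ∨ (j + 1 - i = k ∧ i < m)) then pvBest dots i j else 0)
    (v : Int) (hv : v = pvBest dots m (m + k - 1)) :
    (dp'.set m ((dp'.getD m []).set (m + k - 1) v)).length = N ∧
    (∀ i', ((dp'.set m ((dp'.getD m []).set (m + k - 1) v)).getD i' []).length =
      if i' < N then N else 0) ∧
    ∀ i j, i < N → j < N → get2 (dp'.set m ((dp'.getD m []).set (m + k - 1) v)) i j =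
      if i ≤ j ∧ (j + 1 - i ≤ k - 1 ∨ (j + 1 - i = k ∧ i < m + 1)) then pvBest dots i j else 0 := by
  have hmN : m < N := by omega
  have hrm : (dp'.getD m []).length = N := by rw [hrow m, if_pos hmN]
  refine ⟨by simp [hlen], fun i' => ?_, fun i j hi hj => ?_⟩
  · rw [getD_set_gen]
    by_cases h : m = i' ∧ m < dp'.length
    · rw [if_pos h, List.length_set, hrm, ← h.1, if_pos hmN]
    · rw [if_neg h]
      exact hrow i'
  · unfold get2
    rw [getD_set_gen]
    by_cases h : m = i ∧ m < dp'.length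
    · obtain ⟨he, hlt⟩ := h
      subst he
      rw [if_pos ⟨rfl, hlt⟩, getD_set_gen, hrm]
      by_cases h2 : m + k - 1 = j ∧ m + k - 1 < N
      · rw [if_pos h2, ← h2.1, hv, if_pos (by omega)]
      · rw [if_neg h2, show (dp'.getD m []).getD j 0 = get2 dp' m j from rfl,
          hget m j hmN hj]
        have hj2 : ¬ m + k - 1 = j := fun he2 => h2 ⟨he2, by omega⟩
        split_ifs with h3 h4 <;> first | rfl | omega
    · rw [if_neg h]
      have hne : m ≠ i := fun he => h ⟨he, by omega⟩
      rw [show (dp'.getD i []).getD j 0 = get2 dp' i j from rfl, hget i j hi hj]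
      split_ifs with h3 h4 <;> first | rfl | omega

theorem invA_step (dots ps : List Int) (N k : Nat)
    (hps : ps = buildPre dots N) (hN : N ≤ dots.length)
    (hk1 : 1 ≤ k) (hkN : k ≤ N) (dp : List (List Int))
    (h : InvA dots N (k-1) dp) : InvA dots N k (innerA dots ps N k dp) := by
  have main : ∀ m ≤ N - k + 1, InvAm dots N k m ((List.range m).foldl (fun dp i =>
      if k = 1 then
        dp.set i ((dp.getD i []).set (i + k - 1) (dots.getD i 0))
      else
        dp.set i ((dp.getD i []).set (i + k - 1)
          (max (dots.getD i 0
                  + (getSumA ps (i+1) (i + k - 1) - (dp.getD (i+1) []).getD (i + k - 1) 0))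
               (dots.getD (i + k - 1) 0
                  + (getSumA ps i (i + k - 1 - 1) - (dp.getD i []).getD (i + k - 1 - 1) 0))))) dp) := by
    intro m
    induction m with
    | zero =>
      intro _
      simp only [List.range_zero, List.foldl_nil]
      refine ⟨h.1, h.2.1, fun i j hi hj => ?_⟩
      rw [h.2.2 i j hi hj]
      split_ifs with h3 h4 <;> first | rfl | omega
    | succ m ih =>
      intro hm
      obtain ⟨hlen, hrow, hget⟩ := ih (by omega)
      rw [List.range_succ, List.foldl_append]
      simp only [List.foldl_cons, List.foldl_nil]
      by_cases hk : k = 1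
      · rw [if_pos hk]
        refine set2_inv dots N k m hk1 hkN (by omega) _ hlen hrow hget _ ?_
        subst hk
        simpa using (pvBest_self dots m).symm
      · rw [if_neg hk]
        exact set2_inv dots N k m hk1 hkN (by omega) _ hlen hrow hget _
          (stepA_val dots ps N k m hps hN (by omega) hkN (by omega) _ hget)
  obtain ⟨l1, l2, l3⟩ := main (N - k + 1) le_rfl
  unfold innerA
  refine ⟨l1, l2, fun i j hi hj => ?_⟩
  rw [l3 i j hi hj]
  split_ifs with h3 h4 <;> first | rfl | omega

theorem solve_eq_best (n : Int) (dots : List Int) (h1 : 1 ≤ n) (h2 : n ≤ (dots.length : Int)) :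
    solve n dots = pvBest dots 0 (n.toNat - 1) := by
  have hN1 : 1 ≤ n.toNat := by omega
  have hNlen : n.toNat ≤ dots.length := by omega
  have main : ∀ m ≤ n.toNat, InvA dots n.toNat m
      ((List.range m).foldl (fun dp k' => innerA dots (buildPre dots n.toNat) n.toNat (k'+1) dp)
        (List.replicate n.toNat (List.replicate n.toNat (0:Int)))) := by
    intro m
    induction m with
    | zero =>
      intro _
      simpa using invA_init dots n.toNat
    | succ m ih =>
      intro hm
      rw [List.range_succ, List.foldl_append]
      simp only [List.foldl_cons, List.foldl_nil]
      exact invA_step dots (buildPre dots n.toNat) n.toNat (m+1) rfl hNlen (by omega) (by omega)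
        _ (ih (by omega))
  have inv := main n.toNat le_rfl
  show get2 ((List.range n.toNat).foldl
      (fun dp k' => innerA dots (buildPre dots n.toNat) n.toNat (k'+1) dp)
      (List.replicate n.toNat (List.replicate n.toNat (0:Int)))) 0 (n.toNat - 1) = _
  rw [inv.2.2 0 (n.toNat - 1) (by omega) (by omega), if_pos (by omega)]

-- ===== B-side invariant: every memo entry is a correct sub-game value =====

def GoodB (dots : List Int) (N : Nat) (memo : PySem.Dict (Nat × Nat) Int) : Prop :=
  ∀ i j v, memo.get? (i, j) = some v → i ≤ j ∧ j < N ∧ v = pvBest dots i j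

theorem bestB_spec (dots : List Int) (N : Nat) (hN : N ≤ dots.length) :
    ∀ (fuel i j : Nat) (memo : PySem.Dict (Nat × Nat) Int),
      i ≤ j → j < N → j - i < fuel → GoodB dots N memo →
      (bestB dots (buildPre dots N) fuel i j memo).1 = pvBest dots i j ∧
      GoodB dots N (bestB dots (buildPre dots N) fuel i j memo).2 := by
  intro fuel
  induction fuel with
  | zero => intro i j memo hij hjN hfuel _; omega
  | succ fuel ih =>
    intro i j memo hij hjN hfuel hgood
    rw [bestB]
    by_cases he : i = j
    · subst he
      simpa [pvBest_self] using hgood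
    · have hlt : i < j := by omega
      rw [if_neg he]
      cases hm : PySem.Dict.get? memo (i, j) with
      | some v =>
        dsimp only
        exact ⟨(hgood i j v hm).2.2, hgood⟩
      | none =>
        dsimp only
        obtain ⟨h1v, h1g⟩ := ih (i+1) j memo (by omega) hjN (by omega) hgood
        obtain ⟨h2v, h2g⟩ := ih i (j-1)
          (bestB dots (buildPre dots N) fuel (i+1) j memo).2 (by omega) (by omega) (by omega) h1g
        have hp1 : (buildPre dots N).getD (j+1) 0 - (buildPre dots N).getD (i+1) 0
            = pvTot dots (i+1) j := by
          rw [buildPre_spec dots N hN (j+1) (by omega), buildPre_spec dots N hN (i+1) (by omega)]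
          rfl
        have hp2 : (buildPre dots N).getD j 0 - (buildPre dots N).getD i 0
            = pvTot dots i (j-1) := by
          rw [buildPre_spec dots N hN j (by omega), buildPre_spec dots N hN i (by omega)]
          unfold pvTot
          rw [show j - 1 + 1 = j by omega]
        have hval : max (dots.getD i 0
              + ((buildPre dots N).getD (j+1) 0 - (buildPre dots N).getD (i+1) 0
                  - (bestB dots (buildPre dots N) fuel (i+1) j memo).1))
            (dots.getD j 0
              + ((buildPre dots N).getD j 0 - (buildPre dots N).getD i 0
                  - (bestB dots (buildPre dots N) fuel i (j-1)
                      (bestB dots (buildPre dots N) fuel (i+1) j memo).2).1))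
            = pvBest dots i j := by
          rw [h1v, h2v, hp1, hp2]
          have ht1 := tot_left dots i j hlt (by omega)
          have ht2 := tot_right dots i j hlt (by omega)
          have e1 : dots.getD i 0 + (pvTot dots (i+1) j - pvBest dots (i+1) j)
              = pvTot dots i j - pvBest dots (i+1) j := by omega
          have e2 : dots.getD j 0 + (pvTot dots i (j-1) - pvBest dots i (j-1))
              = pvTot dots i j - pvBest dots i (j-1) := by omega
          rw [e1, e2, max_sub_min, pvBest_lt dots i j hlt]
        refine ⟨hval, ?_⟩
        intro i' j' v' hv'
        rw [PySem.Dict.get?_insert] at hv'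
        by_cases hk : (i', j') = ((i, j) : Nat × Nat)
        · rw [if_pos hk] at hv'
          have hi' : i' = i := congrArg Prod.fst hk
          have hj' : j' = j := congrArg Prod.snd hk
          have hv : v' = _ := (Option.some.inj hv').symm
          subst hi'
          subst hj'
          exact ⟨hij, hjN, by rw [hv, hval]⟩
        · rw [if_neg hk] at hv'
          exact h2g i' j' v' hv'

theorem solve_alt_eq_best (n : Int) (dots : List Int) (h1 : 1 ≤ n)
    (h2 : n ≤ (dots.length : Int)) :
    solve_alt n dots = pvBest dots 0 (n.toNat - 1) := by
  have hN1 : 1 ≤ n.toNat := by omega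
  have hNlen : n.toNat ≤ dots.length := by omega
  have hempty : GoodB dots n.toNat PySem.Dict.empty := by
    intro i j v hv
    simp [PySem.Dict.get?_empty] at hv
  exact (bestB_spec dots n.toNat hNlen n.toNat 0 (n.toNat - 1) PySem.Dict.empty
    (by omega) (by omega) (by omega) hempty).1

-- ===== VERDICT (by name: the statement is the Claim_ definition above) =====
theorem solve_spec : Claim_equal_solve := by
  intro n dots _hD hP
  obtain ⟨h1, h2⟩ := hP
  unfold Spec_solve
  rw [solve_eq_best n dots h1 h2, solve_alt_eq_best n dots h1 h2]
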